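-- pv_equiv track=rewrite | github.com/EvilFreelancer/ruMorpheme | train.py | collect_buckets
-- ===== SOURCE A (Python) =====
-- import bisect
-- from itertools import chain
--
-- def collect_buckets(lengths, buckets_number, max_bucket_size=-1):
--     m = len(lengths)
--     lengths = sorted(lengths)
--     bucket_lengths = []
--     last_bucket_length = 0
--     for i in range(buckets_number):
--         level = (m * (i + 1) // buckets_number) - 1
--         curr_length = lengths[level]
--         if curr_length > last_bucket_length:
--             bucket_lengths.append(curr_length)
--             last_bucket_length = curr_length
--     indexes = [[] for _ in bucket_lengths]
--     for i, length in enumerate(lengths):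
--         index = bisect.bisect_left(bucket_lengths, length)
--         indexes[index].append(i)
--     if max_bucket_size != -1:
--         bucket_lengths = list(chain.from_iterable(
--             ([L] * ((len(curr_indexes) - 1) // max_bucket_size + 1))
--             for L, curr_indexes in zip(bucket_lengths, indexes)
--             if len(curr_indexes) > 0))
--         indexes = [curr_indexes[start:start + max_bucket_size]
--                    for curr_indexes in indexes
--                    for start in range(0, len(curr_indexes), max_bucket_size)]
--     return [(L, curr_indexes) for L, curr_indexes in zip(bucket_lengths, indexes) if len(curr_indexes) > 0]
-- ===== SOURCE B (Python) =====
-- import bisect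
--
--
-- def collect_buckets(lengths, buckets_number, max_bucket_size=-1):
--     # Same thresholds as before, but buckets are emitted as contiguous index
--     # ranges cut directly out of the sorted order (no per-element dispatch).
--     m = len(lengths)
--     lengths = sorted(lengths)
--     bucket_lengths = []
--     last_bucket_length = 0
--     for i in range(buckets_number):
--         curr_length = lengths[(m * (i + 1) // buckets_number) - 1]
--         if curr_length > last_bucket_length:
--             bucket_lengths.append(curr_length)
--             last_bucket_length = curr_length
--     result = []
--     prev = 0
--     for L in bucket_lengths:
--         end = bisect.bisect_right(lengths, L)
--         if max_bucket_size != -1: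
--             for start in range(prev, end, max_bucket_size):
--                 result.append((L, list(range(start, min(start + max_bucket_size, end)))))
--         elif end > prev:
--             result.append((L, list(range(prev, end))))
--         prev = end
--     return result
-- ===== Notes on version B (the rewrite author's own statement) =====
-- stated objective: alternative
-- what changed: Instead of dispatching every element with bisect_left into per-bucket index lists and then slicing them, B cuts the sorted index sequence directly: one pass over the thresholds computes each bucket's contiguous [prev, bisect_right(lengths, L)) index range and emits the max_bucket_size chunks on the fly, so the per-element loop and the intermediate indexes/bucket_lengths rebuild disappear.
import Mathlib
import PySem

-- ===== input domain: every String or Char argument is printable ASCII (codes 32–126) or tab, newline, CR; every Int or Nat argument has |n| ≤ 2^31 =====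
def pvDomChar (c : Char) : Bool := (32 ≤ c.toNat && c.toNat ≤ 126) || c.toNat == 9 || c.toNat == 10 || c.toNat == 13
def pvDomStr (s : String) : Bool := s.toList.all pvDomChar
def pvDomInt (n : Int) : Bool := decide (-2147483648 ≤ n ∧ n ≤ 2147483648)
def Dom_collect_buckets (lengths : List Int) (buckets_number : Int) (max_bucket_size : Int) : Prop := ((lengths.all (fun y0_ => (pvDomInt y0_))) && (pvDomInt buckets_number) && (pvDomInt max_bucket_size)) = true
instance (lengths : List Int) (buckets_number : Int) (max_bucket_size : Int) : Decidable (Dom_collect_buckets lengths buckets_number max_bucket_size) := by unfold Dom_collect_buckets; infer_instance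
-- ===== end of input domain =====

-- B replaces A's per-element bisect_left dispatch into mutable buckets by cutting the sorted
-- index sequence directly at each threshold's bisect_right boundary (objective: alternative decomposition).


-- ===== PORT A =====
-- The threshold loop is textually identical in A and in B, so both ports share this helper.
-- lengths[level]: pyGetD is exact here — under Pre_ the (possibly -1) index is always in range.
def pvThresholds (sl : List Int) (m buckets_number : Int) : List Int × Int :=
  (PySem.List.pyRange 0 buckets_number 1).foldl
    (fun (st : List Int × Int) i =>
      let curr := PySem.List.pyGetD sl (PySem.Int.floordiv (m * (i + 1)) buckets_number - 1) 0
      if curr > st.2 then (st.1 ++ [curr], curr) else st)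
    ([], 0)

def collect_buckets (lengths : List Int) (buckets_number : Int) (max_bucket_size : Int) : List (Int × List Int) :=
  let m : Int := (lengths.length : Int)
  let sl := PySem.List.sorted lengths (fun x => x)
  let bucket_lengths := (pvThresholds sl m buckets_number).1
  let indexes0 : List (List Int) := bucket_lengths.map (fun _ => ([] : List Int))
  -- indexes[index].append(i): List.modify is exact here — under Pre_ the index is always < len(indexes)
  let indexes := (PySem.List.enumerate sl 0).foldl
    (fun idxs p => idxs.modify (PySem.List.bisectLeft bucket_lengths p.2) (fun l => l ++ [p.1]))
    indexes0
  let bucket_lengths2 :=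
    if max_bucket_size ≠ -1 then
      ((bucket_lengths.zip indexes).filter (fun p => 0 < p.2.length)).flatMap
        (fun p => List.replicate
          ((PySem.Int.floordiv ((p.2.length : Int) - 1) max_bucket_size) + 1).toNat p.1)
    else bucket_lengths
  let indexes2 :=
    if max_bucket_size ≠ -1 then
      indexes.flatMap (fun curr =>
        (PySem.List.pyRange 0 (curr.length : Int) max_bucket_size).map
          (fun start => PySem.List.slice curr (some start) (some (start + max_bucket_size))))
    else indexes
  (bucket_lengths2.zip indexes2).filter (fun p => 0 < p.2.length)

-- ===== PORT B =====
def collect_buckets_alt (lengths : List Int) (buckets_number : Int) (max_bucket_size : Int) : List (Int × List Int) :=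
  let m : Int := (lengths.length : Int)
  let sl := PySem.List.sorted lengths (fun x => x)
  let bucket_lengths := (pvThresholds sl m buckets_number).1
  (bucket_lengths.foldl
    (fun (st : List (Int × List Int) × Int) L =>
      let e : Int := (PySem.List.bisectRight sl L : Int)
      let out :=
        if max_bucket_size ≠ -1 then
          st.1 ++ (PySem.List.pyRange st.2 e max_bucket_size).map
            (fun start => (L, PySem.List.pyRange start (min (start + max_bucket_size) e) 1))
        else if e > st.2 then st.1 ++ [(L, PySem.List.pyRange st.2 e 1)]
        else st.1
      (out, e))
    ([], 0)).1

-- ===== PRECONDITION & SPEC =====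
-- Pre_ excludes exactly the inputs on which A raises: lengths=[] with buckets_number≥1 and
-- lengths without a positive element (IndexError), and max_bucket_size=0 (ZeroDivisionError).
def Pre_collect_buckets (lengths : List Int) (buckets_number : Int) (max_bucket_size : Int) : Prop :=
  (lengths = [] ∧ buckets_number ≤ 0) ∨
  (lengths ≠ [] ∧ 1 ≤ buckets_number ∧ (∃ x ∈ lengths, 0 < x) ∧ max_bucket_size ≠ 0)
instance (lengths : List Int) (buckets_number : Int) (max_bucket_size : Int) : Decidable (Pre_collect_buckets lengths buckets_number max_bucket_size) := by unfold Pre_collect_buckets; infer_instance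
def pvWitness_collect_buckets : List Int × Int × Int := ([3, 1, 2], 2, -1)

def Spec_collect_buckets (lengths : List Int) (buckets_number : Int) (max_bucket_size : Int) (out : List (Int × List Int)) : Prop := out = collect_buckets_alt lengths buckets_number max_bucket_size
instance (lengths : List Int) (buckets_number : Int) (max_bucket_size : Int) (out : List (Int × List Int)) : Decidable (Spec_collect_buckets lengths buckets_number max_bucket_size out) := by unfold Spec_collect_buckets; infer_instance

-- ===== CLAIM (what is proved, stated in full; the proofs are below) =====
def Claim_equal_collect_buckets : Prop := ∀ (lengths : List Int) (buckets_number : Int) (max_bucket_size : Int), Dom_collect_buckets lengths buckets_number max_bucket_size → Pre_collect_buckets lengths buckets_number max_bucket_size → Spec_collect_buckets lengths buckets_number max_bucket_size (collect_buckets lengths buckets_number max_bucket_size)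

-- ===== LEMMAS AND PROOFS =====

-- bisect_right on a sorted list: i < bisect_right(sl, y) iff sl[i] <= y
lemma pv_br_le_len (SL : List Int) (y : Int) (hs : SL.Pairwise (· ≤ ·)) :
    PySem.List.bisectRight SL y ≤ SL.length :=
  (PySem.List.bisectRight_spec SL y hs).1

lemma pv_br_lt_iff (SL : List Int) (hs : SL.Pairwise (· ≤ ·)) (i : Nat) (hi : i < SL.length)
    (y : Int) : i < PySem.List.bisectRight SL y ↔ SL[i] ≤ y := by
  obtain ⟨hlen, hfwd, hbwd⟩ := PySem.List.bisectRight_spec SL y hs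
  constructor
  · intro h; exact hfwd i hi h
  · intro h; by_contra hc
    exact absurd h (not_le.mpr (hbwd i hi (by omega)))

lemma pv_br_mono (SL : List Int) (hs : SL.Pairwise (· ≤ ·)) {y z : Int} (h : y ≤ z) :
    PySem.List.bisectRight SL y ≤ PySem.List.bisectRight SL z := by
  by_contra hc
  have hz := pv_br_le_len SL z hs
  have hzy : PySem.List.bisectRight SL z < PySem.List.bisectRight SL y := by omega
  have hy := pv_br_le_len SL y hs
  have hi : PySem.List.bisectRight SL z < SL.length := by omega
  have h1 : SL[PySem.List.bisectRight SL z] ≤ y := (pv_br_lt_iff SL hs _ hi y).mp hzy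
  have h2 : z < SL[PySem.List.bisectRight SL z] :=
    (PySem.List.bisectRight_spec SL z hs).2.2 _ hi le_rfl
  omega

-- bisect_left characterisation on a sorted threshold list
lemma pv_bl_eq_iff (bl : List Int) (hb : bl.Pairwise (· ≤ ·)) (k : Nat) (hk : k < bl.length)
    (x : Int) :
    PySem.List.bisectLeft bl x = k ↔ (k = 0 ∨ bl[k-1]'(by omega) < x) ∧ x ≤ bl[k] := by
  obtain ⟨hlen, hfwd, hbwd⟩ := PySem.List.bisectLeft_spec bl x hb
  constructor
  · intro h
    refine ⟨?_, hbwd k hk (by omega)⟩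
    rcases Nat.eq_zero_or_pos k with h0 | h0
    · exact Or.inl h0
    · exact Or.inr (hfwd (k-1) (by omega) (by omega))
  · rintro ⟨h1, h2⟩
    have hle : PySem.List.bisectLeft bl x ≤ k := by
      by_contra hc
      exact absurd (hfwd k hk (by omega)) (not_lt.mpr h2)
    have hge : k ≤ PySem.List.bisectLeft bl x := by
      rcases h1 with h0 | h0
      · omega
      · by_contra hc
        exact absurd (hbwd (k-1) (by omega) (by omega)) (not_le.mpr h0)
    omega

-- the threshold loop invariant: strictly increasing, last = running max, bounded by M
lemma pv_thr_fold_inv (f : Int → Int) (M : Int) (l : List Int) (hf : ∀ i ∈ l, f i ≤ M) :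
    ∀ (st : List Int × Int),
    st.1.Pairwise (· < ·) → (∀ x ∈ st.1, x ≤ st.2) → (st.1 = [] → st.2 = 0) →
    (∀ h : st.1 ≠ [], st.1.getLast h = st.2) → st.2 ≤ M →
    ((l.foldl (fun st i =>
        let curr := f i
        if curr > st.2 then (st.1 ++ [curr], curr) else st) st).1.Pairwise (· < ·) ∧
     (∀ x ∈ (l.foldl (fun st i =>
        let curr := f i
        if curr > st.2 then (st.1 ++ [curr], curr) else st) st).1,
        x ≤ (l.foldl (fun st i =>
        let curr := f i
        if curr > st.2 then (st.1 ++ [curr], curr) else st) st).2) ∧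
     ((l.foldl (fun st i =>
        let curr := f i
        if curr > st.2 then (st.1 ++ [curr], curr) else st) st).1 = [] →
        (l.foldl (fun st i =>
        let curr := f i
        if curr > st.2 then (st.1 ++ [curr], curr) else st) st).2 = 0) ∧
     (∀ h : (l.foldl (fun st i =>
        let curr := f i
        if curr > st.2 then (st.1 ++ [curr], curr) else st) st).1 ≠ [],
        (l.foldl (fun st i =>
        let curr := f i
        if curr > st.2 then (st.1 ++ [curr], curr) else st) st).1.getLast h =
        (l.foldl (fun st i =>
        let curr := f i
        if curr > st.2 then (st.1 ++ [curr], curr) else st) st).2) ∧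
     (l.foldl (fun st i =>
        let curr := f i
        if curr > st.2 then (st.1 ++ [curr], curr) else st) st).2 ≤ M) := by
  induction l with
  | nil => intro st h1 h2 h3 h4 h5; exact ⟨h1, h2, h3, h4, h5⟩
  | cons i t ih =>
    intro st h1 h2 h3 h4 h5
    have hf2 : ∀ j ∈ t, f j ≤ M := fun j hj => hf j (List.mem_cons_of_mem _ hj)
    have hfi : f i ≤ M := hf i List.mem_cons_self
    rw [List.foldl_cons]
    by_cases hc : f i > st.2
    · simp only [if_pos hc]
      refine ih hf2 _ ?_ ?_ ?_ ?_ hfi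
      · refine List.pairwise_append.mpr ⟨h1, List.pairwise_singleton _ _, ?_⟩
        intro x hx y hy
        simp only [List.mem_singleton] at hy
        subst hy
        exact lt_of_le_of_lt (h2 x hx) hc
      · intro x hx
        rcases List.mem_append.mp hx with hx | hx
        · exact le_of_lt (lt_of_le_of_lt (h2 x hx) hc)
        · simp only [List.mem_singleton] at hx; omega
      · intro habs; simp at habs
      · intro _; simp
    · simp only [if_neg hc]
      exact ih hf2 st h1 h2 h3 h4 h5

-- A's (and B's shared) bucket_lengths list is strictly increasing
lemma pv_thresholds_pairwise (sl : List Int) (m bn : Int) :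
    (pvThresholds sl m bn).1.Pairwise (· < ·) := by
  have h := pv_thr_fold_inv
    (fun i => PySem.List.pyGetD sl (PySem.Int.floordiv (m * (i + 1)) bn - 1) 0)
    ((PySem.List.pyRange 0 bn 1).foldl
      (fun acc i => max acc (PySem.List.pyGetD sl (PySem.Int.floordiv (m * (i + 1)) bn - 1) 0)) 0)
    (PySem.List.pyRange 0 bn 1)
    (PySem.List.le_foldl_max_int (PySem.List.pyRange 0 bn 1)
      (fun i => PySem.List.pyGetD sl (PySem.Int.floordiv (m * (i + 1)) bn - 1) 0) 0).2
    ([], 0) (by simp) (by simp) (by simp) (by simp) ?_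
  · exact h.1
  · exact (PySem.List.le_foldl_max_int (PySem.List.pyRange 0 bn 1)
      (fun i => PySem.List.pyGetD sl (PySem.Int.floordiv (m * (i + 1)) bn - 1) 0) 0).1

-- the per-element dispatch loop of A, characterised bucket by bucket
lemma pv_bucket_fold_length (xs : List (Int × Int)) (bl : List Int) (init : List (List Int)) :
    (xs.foldl (fun idxs p => idxs.modify (PySem.List.bisectLeft bl p.2) (fun l => l ++ [p.1])) init).length
      = init.length := by
  induction xs generalizing init with
  | nil => rfl
  | cons p t ih => simp [List.foldl_cons, ih, List.length_modify]

lemma pv_bucket_fold_getElem (xs : List (Int × Int)) (bl : List Int) (init : List (List Int))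
    (k : Nat) (hk : k < init.length) :
    (xs.foldl (fun idxs p => idxs.modify (PySem.List.bisectLeft bl p.2) (fun l => l ++ [p.1])) init)[k]?
      = some (init[k] ++ (xs.filter (fun p => PySem.List.bisectLeft bl p.2 == k)).map (·.1)) := by
  induction xs generalizing init with
  | nil => simp [List.getElem?_eq_getElem hk]
  | cons p t ih =>
    rw [List.foldl_cons]
    have hk' : k < (init.modify (PySem.List.bisectLeft bl p.2) (fun l => l ++ [p.1])).length := by
      simpa [List.length_modify] using hk
    rw [ih _ hk']
    have hmod := List.getElem_modify (fun l => l ++ [p.1]) (PySem.List.bisectLeft bl p.2) init k hk'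
    by_cases hjk : PySem.List.bisectLeft bl p.2 = k
    · rw [hmod, if_pos hjk]
      simp [hjk]
    · rw [hmod, if_neg hjk]
      simp [hjk]

-- B's view of the buckets: consecutive index intervals cut at the bisect_right boundaries
def pvIvs (SL : List Int) : Int → List Int → List (List Int)
  | _, [] => []
  | prev, L :: t =>
    PySem.List.pyRange prev ((PySem.List.bisectRight SL L : Nat) : Int) 1 ::
      pvIvs SL ((PySem.List.bisectRight SL L : Nat) : Int) t

lemma pv_pvIvs_length (SL : List Int) (prev : Int) (bs : List Int) :
    (pvIvs SL prev bs).length = bs.length := by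
  induction bs generalizing prev with
  | nil => rfl
  | cons L t ih => simp [pvIvs, ih]

lemma pv_pvIvs_getElem (SL : List Int) (prev : Int) (bs : List Int) (k : Nat)
    (hk : k < bs.length) :
    (pvIvs SL prev bs)[k]? =
      some (PySem.List.pyRange
        (if k = 0 then prev else ((PySem.List.bisectRight SL (bs[k-1]'(by omega)) : Nat) : Int))
        ((PySem.List.bisectRight SL bs[k] : Nat) : Int) 1) := by
  induction bs generalizing prev k with
  | nil => simp at hk
  | cons L t ih =>
    rcases k with _ | k
    · simp [pvIvs]
    · have hk' : k < t.length := by simpa using hk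
      simp only [pvIvs, List.getElem?_cons_succ]
      rw [ih _ k hk']
      rcases k with _ | k
      · simp
      · simp

-- filtering an integer range by an interval predicate
lemma pv_filter_range_interval (a b m : Int) (h0 : 0 ≤ a) (hab : a ≤ b) (hbm : b ≤ m) :
    (PySem.List.pyRange 0 m 1).filter (fun i => decide (a ≤ i ∧ i < b)) = PySem.List.pyRange a b 1 := by
  rw [PySem.List.pyRange_one_append 0 a m h0 (by omega),
      PySem.List.pyRange_one_append a b m hab hbm,
      List.filter_append, List.filter_append]
  have h1 : (PySem.List.pyRange 0 a 1).filter (fun i => decide (a ≤ i ∧ i < b)) = [] := by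
    apply List.filter_eq_nil_iff.mpr
    intro x hx
    rw [PySem.List.mem_pyRange_one] at hx
    simp only [decide_eq_true_eq]
    omega
  have h2 : (PySem.List.pyRange a b 1).filter (fun i => decide (a ≤ i ∧ i < b)) =
      PySem.List.pyRange a b 1 := by
    apply List.filter_eq_self.mpr
    intro x hx
    rw [PySem.List.mem_pyRange_one] at hx
    simp only [decide_eq_true_eq]
    omega
  have h3 : (PySem.List.pyRange b m 1).filter (fun i => decide (a ≤ i ∧ i < b)) = [] := by
    apply List.filter_eq_nil_iff.mpr
    intro x hx
    rw [PySem.List.mem_pyRange_one] at hx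
    simp only [decide_eq_true_eq]
    omega
  rw [h1, h2, h3, List.nil_append, List.append_nil]

lemma pv_map_fst_filter (l : List (Int × Int)) (a b : Int) :
    (l.filter (fun p => decide (a ≤ p.1 ∧ p.1 < b))).map (·.1)
      = (l.map (·.1)).filter (fun i => decide (a ≤ i ∧ i < b)) :=
  (List.filter_map (f := (·.1)) (p := fun i => decide (a ≤ i ∧ i < b)) (l := l)).symm

lemma pv_filter_bucket (SL : List Int) (hs : SL.Pairwise (· ≤ ·)) (bl : List Int)
    (hb : bl.Pairwise (· < ·)) (k : Nat) (hk : k < bl.length) :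
    ((PySem.List.enumerate SL 0).filter (fun p => PySem.List.bisectLeft bl p.2 == k)).map (·.1)
      = PySem.List.pyRange
          (if k = 0 then 0 else ((PySem.List.bisectRight SL (bl[k-1]'(by omega)) : Nat) : Int))
          ((PySem.List.bisectRight SL bl[k] : Nat) : Int) 1 := by
  have hble : bl.Pairwise (· ≤ ·) := hb.imp le_of_lt
  rw [List.filter_congr (q := fun p : Int × Int =>
      decide ((if k = 0 then 0 else ((PySem.List.bisectRight SL (bl[k-1]'(by omega)) : Nat) : Int)) ≤ p.1 ∧
        p.1 < ((PySem.List.bisectRight SL bl[k] : Nat) : Int))) ?_]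
  · rw [pv_map_fst_filter, PySem.List.map_fst_enumerate]
    have hm0 : (0 : Int) + (SL.length : Int) = (SL.length : Int) := by ring
    rw [hm0]
    apply pv_filter_range_interval
    · split_ifs with h0
      · rfl
      · positivity
    · split_ifs with h0
      · positivity
      · have hlt : bl[k-1]'(by omega) < bl[k] :=
          List.pairwise_iff_getElem.mp hb (k-1) k (by omega) hk (by omega)
        exact_mod_cast pv_br_mono SL hs (le_of_lt hlt)
    · exact_mod_cast pv_br_le_len SL bl[k] hs
  · intro p hp
    rw [PySem.List.mem_enumerate_iff] at hp
    obtain ⟨i, hi, rfl⟩ := hp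
    apply Bool.eq_iff_iff.mpr
    simp only [beq_iff_eq, decide_eq_true_eq]
    rw [pv_bl_eq_iff bl hble k hk]
    have hrb := pv_br_lt_iff SL hs i hi bl[k]
    constructor
    · rintro ⟨h1, h2⟩
      refine ⟨?_, by omega⟩
      split_ifs with h0
      · omega
      · rcases h1 with h1 | h1
        · omega
        · have := pv_br_lt_iff SL hs i hi (bl[k-1]'(by omega))
          omega
    · rintro ⟨h1, h2⟩
      refine ⟨?_, by omega⟩
      split_ifs at h1 with h0
      · exact Or.inl h0
      · refine Or.inr ?_
        have := pv_br_lt_iff SL hs i hi (bl[k-1]'(by omega))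
        omega

lemma pv_indexes_eq_pvIvs (SL : List Int) (hs : SL.Pairwise (· ≤ ·)) (bl : List Int)
    (hb : bl.Pairwise (· < ·)) :
    (PySem.List.enumerate SL 0).foldl
        (fun idxs p => idxs.modify (PySem.List.bisectLeft bl p.2) (fun l => l ++ [p.1]))
        (bl.map (fun _ => ([] : List Int)))
      = pvIvs SL 0 bl := by
  apply List.ext_getElem?
  intro k
  by_cases hk : k < bl.length
  · rw [pv_bucket_fold_getElem _ bl _ k (by simpa using hk)]
    rw [pv_pvIvs_getElem SL 0 bl k hk]
    rw [List.getElem_map]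
    rw [List.nil_append]
    rw [pv_filter_bucket SL hs bl hb k hk]
  · rw [List.getElem?_eq_none (by rw [pv_bucket_fold_length]; simp; omega),
        List.getElem?_eq_none (by rw [pv_pvIvs_length]; omega)]

-- the common recursive shape of both final pipelines
def pvOut (SL : List Int) (mbs : Int) : Int → List Int → List (Int × List Int)
  | _, [] => []
  | prev, L :: t =>
    (if mbs ≠ -1 then
      (PySem.List.pyRange prev ((PySem.List.bisectRight SL L : Nat) : Int) mbs).map
        (fun s => (L, PySem.List.pyRange s (min (s + mbs) ((PySem.List.bisectRight SL L : Nat) : Int)) 1))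
    else if prev < ((PySem.List.bisectRight SL L : Nat) : Int) then
      [(L, PySem.List.pyRange prev ((PySem.List.bisectRight SL L : Nat) : Int) 1)]
    else []) ++ pvOut SL mbs ((PySem.List.bisectRight SL L : Nat) : Int) t

lemma pv_B_fold_eq (SL : List Int) (mbs : Int) (bs : List Int) :
    ∀ (acc : List (Int × List Int)) (prev : Int),
    (bs.foldl (fun (st : List (Int × List Int) × Int) L =>
        let e : Int := (PySem.List.bisectRight SL L : Int)
        let out :=
          if mbs ≠ -1 then
            st.1 ++ (PySem.List.pyRange st.2 e mbs).map
              (fun start => (L, PySem.List.pyRange start (min (start + mbs) e) 1))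
          else if e > st.2 then st.1 ++ [(L, PySem.List.pyRange st.2 e 1)]
          else st.1
        (out, e)) (acc, prev)).1 = acc ++ pvOut SL mbs prev bs := by
  intro acc prev
  induction bs generalizing acc prev with
  | nil => simp [pvOut]
  | cons L t ih =>
    rw [List.foldl_cons]
    simp only []
    rw [ih]
    simp only [pvOut]
    by_cases hc : mbs ≠ -1
    · rw [if_pos hc, if_pos hc, List.append_assoc]
    · rw [if_neg hc, if_neg hc]
      by_cases hpe : prev < ((PySem.List.bisectRight SL L : Nat) : Int)
      · rw [if_pos (by exact hpe), if_pos hpe, List.append_assoc]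
      · rw [if_neg (by exact hpe), if_neg hpe, List.nil_append]

lemma pv_A_neg1_eq (SL : List Int) (bs : List Int) : ∀ prev : Int,
    (bs.zip (pvIvs SL prev bs)).filter (fun p => 0 < p.2.length) = pvOut SL (-1) prev bs := by
  induction bs with
  | nil => intro prev; simp [pvIvs, pvOut]
  | cons L t ih =>
    intro prev
    by_cases hpe : prev < ((PySem.List.bisectRight SL L : Nat) : Int)
    · have h1 : 0 < (((PySem.List.bisectRight SL L : Nat) : Int) - prev).toNat := by omega
      simp [pvIvs, pvOut, PySem.List.length_pyRange_one, h1, hpe, ih]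
    · have h1 : (((PySem.List.bisectRight SL L : Nat) : Int) - prev).toNat = 0 := by omega
      simp [pvIvs, pvOut, PySem.List.length_pyRange_one, h1, hpe, ih]
lemma pv_pyRange_neg_nil (a b s : Int) (hs : s < 0) (hab : a ≤ b) :
    PySem.List.pyRange a b s = [] := by
  simp only [PySem.List.pyRange]
  rw [if_neg (by omega), if_neg (by omega), if_neg (by omega)]
  rfl

lemma pv_pvOut_neg_eq_nil (SL : List Int) (hs : SL.Pairwise (· ≤ ·)) (mbs : Int)
    (hm : mbs < 0) (hm1 : mbs ≠ -1) (bs : List Int) :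
    ∀ prev : Int, (∀ L ∈ bs, prev ≤ ((PySem.List.bisectRight SL L : Nat) : Int)) →
    bs.Pairwise (· ≤ ·) → pvOut SL mbs prev bs = [] := by
  induction bs with
  | nil => intro prev _ _; rfl
  | cons L t ih =>
    intro prev hall hpw
    simp only [pvOut, if_pos hm1]
    rw [pv_pyRange_neg_nil _ _ _ hm (hall L List.mem_cons_self)]
    rw [List.map_nil, List.nil_append]
    refine ih _ ?_ hpw.of_cons
    intro Lp hLp
    have hLLp : L ≤ Lp := (List.pairwise_cons.mp hpw).1 Lp hLp
    exact_mod_cast pv_br_mono SL hs hLLp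

lemma pv_pyRange_drop (a b : Int) (n : Nat) :
    (PySem.List.pyRange a b 1).drop n = PySem.List.pyRange (a + n) b 1 := by
  apply List.ext_getElem?
  intro k
  rw [List.getElem?_drop, PySem.List.getElem?_pyRange_one, PySem.List.getElem?_pyRange_one]
  split_ifs with h1 h2 h2
  · congr 1; push_cast; ring
  · exfalso; omega
  · exfalso; omega
  · rfl

lemma pv_pyRange_take (a b : Int) (n : Nat) :
    (PySem.List.pyRange a b 1).take n = PySem.List.pyRange a (min (a + n) b) 1 := by
  apply List.ext_getElem?
  intro k
  rw [List.getElem?_take, PySem.List.getElem?_pyRange_one]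
  rw [PySem.List.getElem?_pyRange_one]
  rcases le_total (a + n) b with hmin | hmin
  · rw [min_eq_left hmin]
    split_ifs with h1 h2 h2 <;> first | rfl | (exfalso; omega)
  · rw [min_eq_right hmin]
    split_ifs with h1 h2 h2 <;> first | rfl | (exfalso; omega)

lemma pv_zip_replicate_eq_map {α β : Type} (x : α) (l : List β) :
    (List.replicate l.length x).zip l = l.map (fun b => (x, b)) := by
  induction l with
  | nil => rfl
  | cons b t ih => simp [List.replicate_succ, ih]

lemma pv_pyRange_pos_nil (a b s : Int) (hs : 0 < s) (hab : b ≤ a) :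
    PySem.List.pyRange a b s = [] := by
  rw [PySem.List.pyRange_of_pos _ _ hs, if_neg (not_lt.mpr hab)]
  rfl

lemma pv_chunks_len (d mbs : Int) (hd : 0 < d) (hm : 0 < mbs) :
    (PySem.List.pyRange 0 d mbs).length = ((PySem.Int.floordiv (d - 1) mbs) + 1).toNat := by
  rw [PySem.List.pyRange_of_pos _ _ hm, List.length_map, List.length_range, if_pos hd]
  rw [PySem.Int.floordiv_eq_ediv_of_pos hm]
  have h1 : d - 0 + mbs - 1 = (d - 1) + 1 * mbs := by ring
  rw [h1, Int.add_mul_ediv_right _ _ (by omega)]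

lemma pv_slice_range (prev e s mbs : Int) (hs0 : 0 ≤ s) (hm : 0 < mbs) :
    PySem.List.slice (PySem.List.pyRange prev e 1) (some s) (some (s + mbs))
      = PySem.List.pyRange (prev + s) (min (prev + s + mbs) e) 1 := by
  rw [PySem.List.slice_toNat _ hs0 (by omega), pv_pyRange_drop, pv_pyRange_take]
  have h1 : (prev + (s.toNat : Int)) = prev + s := by omega
  have h2 : ((s + mbs).toNat - s.toNat : Nat) = mbs.toNat := by omega
  rw [h1, h2]
  have h3 : prev + s + ((mbs.toNat : Nat) : Int) = prev + s + mbs := by omega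
  rw [h3]

lemma pv_zip_replicate_eq_map2 {α β : Type} (n : Nat) (x : α) (l : List β) (h : n = l.length) :
    (List.replicate n x).zip l = l.map (fun b => (x, b)) := by
  subst h; exact pv_zip_replicate_eq_map x l

lemma pv_A_pos_eq (SL : List Int) (hs : SL.Pairwise (· ≤ ·)) (mbs : Int) (hm : 0 < mbs)
    (bs : List Int) : ∀ prev : Int, 0 ≤ prev →
    (∀ L ∈ bs, prev ≤ ((PySem.List.bisectRight SL L : Nat) : Int)) → bs.Pairwise (· ≤ ·) →
    ((((bs.zip (pvIvs SL prev bs)).filter (fun p => 0 < p.2.length)).flatMap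
        (fun p => List.replicate
          ((PySem.Int.floordiv ((p.2.length : Int) - 1) mbs) + 1).toNat p.1)).zip
      ((pvIvs SL prev bs).flatMap (fun curr =>
        (PySem.List.pyRange 0 (curr.length : Int) mbs).map
          (fun start => PySem.List.slice curr (some start) (some (start + mbs)))))).filter
        (fun p => 0 < p.2.length)
      = pvOut SL mbs prev bs := by
  have hm1 : mbs ≠ -1 := by omega
  induction bs with
  | nil => intro prev _ _ _; simp [pvIvs, pvOut]
  | cons L t ih =>
    intro prev h0 hall hpw
    have hpe : prev ≤ ((PySem.List.bisectRight SL L : Nat) : Int) := hall L List.mem_cons_self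
    have htall : ∀ Lp ∈ t, ((PySem.List.bisectRight SL L : Nat) : Int) ≤ ((PySem.List.bisectRight SL Lp : Nat) : Int) := by
      intro Lp hLp
      exact_mod_cast pv_br_mono SL hs ((List.pairwise_cons.mp hpw).1 Lp hLp)
    have ihx := ih _ (by positivity) htall hpw.of_cons
    simp only [pvIvs, pvOut, List.zip_cons_cons, List.flatMap_cons, if_pos hm1]
    set e : Int := ((PySem.List.bisectRight SL L : Nat) : Int) with he
    set iv : List Int := PySem.List.pyRange prev e 1 with hiv
    have hivlen : (iv.length : Int) = e - prev := by
      rw [hiv, PySem.List.length_pyRange_one]; omega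
    by_cases hlt : prev < e
    · have hivpos : 0 < iv.length := by omega
      rw [List.filter_cons, if_pos (by simpa using hivpos), List.flatMap_cons]
      have hcnt : ((PySem.Int.floordiv ((iv.length : Int) - 1) mbs) + 1).toNat
          = (PySem.List.pyRange 0 (iv.length : Int) mbs).length := by
        rw [pv_chunks_len _ _ (by omega) hm]
      rw [hcnt]
      rw [List.zip_append (by simp)]
      rw [List.filter_append]
      rw [pv_zip_replicate_eq_map2 _ _ _ (by rw [List.length_map])]
      rw [List.map_map]
      have hmapeq : (PySem.List.pyRange 0 ((iv.length : Int)) mbs).map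
            ((fun b => ((L, iv).1, b)) ∘ (fun start => PySem.List.slice iv (some start) (some (start + mbs))))
          = (PySem.List.pyRange prev e mbs).map
            (fun s => (L, PySem.List.pyRange s (min (s + mbs) e) 1)) := by
        rw [hivlen]
        rw [PySem.List.pyRange_of_pos 0 (e - prev) hm, PySem.List.pyRange_of_pos prev e hm]
        rw [if_pos (show (0:Int) < e - prev by omega), if_pos hlt]
        have hcounteq : ((e - prev - 0 + mbs - 1)/mbs) = ((e - prev + mbs - 1)/mbs) := by ring_nf
        rw [hcounteq]
        rw [List.map_map, List.map_map]
        apply List.map_congr_left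
        intro k _
        simp only [Function.comp]
        have hs0 : (0:Int) ≤ mbs * (k : Int) := by positivity
        rw [show (0 : Int) + mbs * (k : Int) = mbs * (k : Int) from by ring]
        rw [hiv, pv_slice_range prev e (mbs * (k : Int)) mbs hs0 hm]
      rw [hmapeq]
      have hfilt : ((PySem.List.pyRange prev e mbs).map
            (fun s => (L, PySem.List.pyRange s (min (s + mbs) e) 1))).filter
            (fun p => decide (0 < p.2.length))
          = (PySem.List.pyRange prev e mbs).map
            (fun s => (L, PySem.List.pyRange s (min (s + mbs) e) 1)) := by
        apply List.filter_eq_self.mpr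
        intro x hx
        obtain ⟨s, hs, rfl⟩ := List.mem_map.mp hx
        obtain ⟨hs1, hs2, _⟩ := (PySem.List.mem_pyRange_iff_of_pos hm s).mp hs
        simp only [decide_eq_true_eq, PySem.List.length_pyRange_one]
        rcases min_cases (s + mbs) e with ⟨hmin, _⟩ | ⟨hmin, _⟩ <;> omega
      rw [hfilt, ihx]
    · rw [List.filter_cons, if_neg (by simpa using (show ¬ 0 < iv.length by omega))]
      have hiv0 : ((iv.length : Int)) = 0 := by omega
      rw [hiv0, pv_pyRange_pos_nil 0 0 mbs hm le_rfl]
      simp only [List.map_nil, List.nil_append]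
      rw [ihx, pv_pyRange_pos_nil prev e mbs hm (by omega)]
      simp

lemma pv_case_empty (bn mbs : Int) (hbn : bn ≤ 0) :
    collect_buckets [] bn mbs = collect_buckets_alt [] bn mbs := by
  have hr : PySem.List.pyRange 0 bn 1 = [] := PySem.List.pyRange_one_eq_nil (by omega)
  simp [collect_buckets, collect_buckets_alt, pvThresholds, hr]

lemma pv_case_main (lengths : List Int) (bn mbs : Int) (hm0 : mbs ≠ 0) :
    collect_buckets lengths bn mbs = collect_buckets_alt lengths bn mbs := by
  have hs : (PySem.List.sorted lengths (fun x => x)).Pairwise (· ≤ ·) :=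
    PySem.List.sorted_pairwise lengths (fun x => x)
  have hb := pv_thresholds_pairwise (PySem.List.sorted lengths (fun x => x)) (lengths.length : Int) bn
  simp only [collect_buckets, collect_buckets_alt]
  rw [pv_indexes_eq_pvIvs _ hs _ hb]
  rw [pv_B_fold_eq, List.nil_append]
  set SL := PySem.List.sorted lengths (fun x => x) with hSL
  set bl := (pvThresholds SL (lengths.length : Int) bn).1 with hbl
  have hble : bl.Pairwise (· ≤ ·) := hb.imp le_of_lt
  have hall : ∀ L ∈ bl, (0:Int) ≤ ((PySem.List.bisectRight SL L : Nat) : Int) := by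
    intro L _; positivity
  by_cases hm1 : mbs = -1
  · subst hm1
    rw [if_neg (by simp), if_neg (by simp)]
    exact pv_A_neg1_eq SL bl 0
  · rw [if_pos hm1, if_pos hm1]
    by_cases hmp : 0 < mbs
    · exact pv_A_pos_eq SL hs mbs hmp bl 0 le_rfl hall hble
    · have hneg : mbs < 0 := by omega
      have hIX : (pvIvs SL 0 bl).flatMap (fun curr =>
          (PySem.List.pyRange 0 (curr.length : Int) mbs).map
            (fun start => PySem.List.slice curr (some start) (some (start + mbs)))) = [] := by
        apply List.flatMap_eq_nil_iff.mpr
        intro curr _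
        rw [pv_pyRange_neg_nil 0 (curr.length : Int) mbs hneg (by positivity)]
        rfl
      rw [hIX, List.zip_nil_right, List.filter_nil]
      exact (pv_pvOut_neg_eq_nil SL hs mbs hneg hm1 bl 0 hall hble).symm


-- ===== VERDICT (by name: the statement is the Claim_ definition above) =====
theorem collect_buckets_spec : Claim_equal_collect_buckets := by
  intro lengths bn mbs _hdom hpre
  unfold Spec_collect_buckets
  rcases hpre with ⟨hnil, hbn⟩ | ⟨_hne, _hbn, _hpos, hm0⟩
  · subst hnil; exact pv_case_empty bn mbs hbn
  · exact pv_case_main lengths bn mbs hm0
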